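-- pv_equiv track=rewrite | github.com/lybbn/RuYi-Panel | utils/security/safe_filter.py | filter_xss1
-- ===== SOURCE A (Python) =====
-- def filter_xss1(content):
--     """
--     @name xss过滤，只替换xss相关关键字符
--     @author lybbn<2024-02-08>
--     """
--     dic_str = {
--         '<':'＜',
--         '>':'＞',
--         '"':'＂',
--         "'":'＇'
--     }
--     for i in dic_str.keys():
--         content = content.replace(i,dic_str[i])
--     return content
-- ===== SOURCE B (Python) =====
-- _XSS_TABLE = str.maketrans({'<': '＜', '>': '＞', '"': '＂', "'": '＇'})
--
-- def filter_xss1(content):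
--     """
--     @name xss过滤，只替换xss相关关键字符
--     @author lybbn<2024-02-08>
--     """
--     return content.translate(_XSS_TABLE)
-- ===== Notes on version B (the rewrite author's own statement) =====
-- stated objective: idiomatic
-- what changed: B builds one translation table with str.maketrans and does a single translate pass over the string instead of four sequential whole-string replace passes.
import Mathlib
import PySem

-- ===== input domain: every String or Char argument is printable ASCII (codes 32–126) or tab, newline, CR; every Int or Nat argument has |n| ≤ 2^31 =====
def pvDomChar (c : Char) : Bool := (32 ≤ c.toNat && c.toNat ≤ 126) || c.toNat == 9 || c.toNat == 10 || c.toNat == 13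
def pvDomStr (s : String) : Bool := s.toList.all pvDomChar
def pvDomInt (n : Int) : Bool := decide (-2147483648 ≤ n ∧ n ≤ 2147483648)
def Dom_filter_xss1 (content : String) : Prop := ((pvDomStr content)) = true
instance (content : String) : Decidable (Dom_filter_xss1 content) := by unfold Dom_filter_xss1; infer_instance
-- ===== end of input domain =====

-- B replaces A's four sequential whole-string replace passes with a single per-character
-- translation-table pass (str.translate); same mapping, identical output (idiomatic).

-- ===== PORT A =====
-- A: loop over the dict's keys in insertion order, replacing each in the whole string.
def filter_xss1 (content : String) : String :=
  let dic : PySem.Dict String String :=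
    (((PySem.Dict.empty.insert "<" "＜").insert ">" "＞").insert "\"" "＂").insert "'" "＇"
  String.mk (dic.keys.foldl
    (fun c i => PySem.Chars.replace c i.toList (dic.getD i "").toList)
    content.toList)

-- ===== PORT B =====
-- B: one pass, each character looked up in the translation table.
def pvXssTr (c : Char) : Char :=
  if c = '<' then '＜'
  else if c = '>' then '＞'
  else if c = '"' then '＂'
  else if c = '\'' then '＇'
  else c

def filter_xss1_alt (content : String) : String :=
  String.mk (content.toList.map pvXssTr)

-- ===== PRECONDITION & SPEC =====
def Spec_filter_xss1 (content : String) (out : String) : Prop := out = filter_xss1_alt content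
instance (content : String) (out : String) : Decidable (Spec_filter_xss1 content out) := by unfold Spec_filter_xss1; infer_instance

-- ===== CLAIM (what is proved, stated in full; the proofs are below) =====
def Claim_equal_filter_xss1 : Prop := ∀ (content : String), Dom_filter_xss1 content → Spec_filter_xss1 content (filter_xss1 content)

-- ===== LEMMAS AND PROOFS =====

-- replacing a single character by a single character is a per-character map
lemma replace_go_single (a b : Char) :
    ∀ (l acc : List Char) (fuel : Nat), l.length ≤ fuel →
      PySem.Chars.replace.go [a] [b] fuel l acc
        = acc.reverse ++ l.map (fun c => if c = a then b else c) := by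
  intro l
  induction l with
  | nil =>
    intro acc fuel _
    cases fuel <;> simp [PySem.Chars.replace.go]
  | cons c t ih =>
    intro acc fuel h
    cases fuel with
    | zero => simp at h
    | succ n =>
      have hlen : t.length ≤ n := Nat.lt_succ_iff.mp (by simpa using h)
      simp only [PySem.Chars.replace.go]
      by_cases hc : c = a
      · subst hc
        have hp : [c].isPrefixOf (c :: t) = true := by simp [List.isPrefixOf]
        rw [if_pos hp, show List.drop [c].length (c :: t) = t from rfl,
          ih (List.reverse [b] ++ acc) n hlen]
        simp
      · rw [if_neg (by simp [List.isPrefixOf]; exact fun h => hc h.symm), ih (c :: acc) n hlen]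
        simp [hc]

lemma replace_single (a b : Char) (l : List Char) :
    PySem.Chars.replace l [a] [b] = l.map (fun c => if c = a then b else c) := by
  simp only [PySem.Chars.replace, List.isEmpty_cons, Bool.false_eq_true, if_false]
  exact replace_go_single a b l [] l.length (le_refl _)

lemma pvXssTr_comp (c : Char) :
    (fun x => if x = '\'' then '＇' else x)
      ((fun x => if x = '"' then '＂' else x)
        ((fun x => if x = '>' then '＞' else x)
          ((fun x => if x = '<' then '＜' else x) c))) = pvXssTr c := by
  unfold pvXssTr
  by_cases h1 : c = '<'
  · subst h1; decide
  · by_cases h2 : c = '>'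
    · subst h2; decide
    · by_cases h3 : c = '"'
      · subst h3; decide
      · by_cases h4 : c = '\''
        · subst h4; decide
        · simp [h1, h2, h3, h4]

-- ===== VERDICT (by name: the statement is the Claim_ definition above) =====
theorem filter_xss1_spec : Claim_equal_filter_xss1 := by
  intro content _
  show String.mk
      (PySem.Chars.replace
        (PySem.Chars.replace
          (PySem.Chars.replace
            (PySem.Chars.replace content.toList ['<'] ['＜'])
            ['>'] ['＞'])
          ['"'] ['＂'])
        ['\''] ['＇'])
    = String.mk (content.toList.map pvXssTr)
  simp only [replace_single, List.map_map]
  exact congrArg String.mk (List.map_congr_left fun c _ => by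
    simpa [Function.comp] using pvXssTr_comp c)
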